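-- pv_equiv track=rewrite | github.com/fnl/libfnl | src/fnl/text/strtok.py | TokenOffsets
-- ===== SOURCE A (Python) =====
-- from unicodedata import category
--
-- def TokenOffsets(string: str):
--     """
--     Yield the offsets of all Unicode category borders in the *string*,
--     including the initial 0 and the final offset value of ``len(string)``.
--
--     Caplitalized words special case: A single upper case letter ('Lu')
--     followed by lower case letters ('Ll') are treated as a single token.
--     """
--     if string is not None and len(string) > 0:
--         yield 0
--         last = category(string[0])
--
--         for i in range(1, len(string)):
--             current = category(string[i])
--
--             if last != current:
--                 # "join" capitalized tokens:
--                 if last == 'Lu' and \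
--                    current == 'Ll' and \
--                    (i == 1 or (i > 1 and category(string[i - 2]) != 'Lu')):
--                     pass
--                 else:
--                     yield i
--
--             last = current
--
--         yield len(string)
-- ===== SOURCE B (Python) =====
-- from unicodedata import category
-- from itertools import groupby
--
-- def TokenOffsets(string: str):
--     """Run-length decomposition: group equal-category runs, emit run starts."""
--     if not string:
--         return
--     runs = [(c, sum(1 for _ in g)) for c, g in groupby(category(ch) for ch in string)]
--     yield 0
--     off = 0
--     prev = None
--     for c, n in runs:
--         if prev is not None:
--             pc, pn = prev
--             if not (pc == 'Lu' and pn == 1 and c == 'Ll'):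
--                 yield off
--         off += n
--         prev = (c, n)
--     yield len(string)
-- ===== Notes on version B (the rewrite author's own statement) =====
-- stated objective: alternative
-- what changed: Replaces A's index loop with a two-index lookback by computing the per-character category list once, run-length grouping it with itertools.groupby, and walking the runs with a running offset, merging a boundary exactly when the previous run is a single uppercase letter directly followed by a lowercase run.
import Mathlib
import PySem

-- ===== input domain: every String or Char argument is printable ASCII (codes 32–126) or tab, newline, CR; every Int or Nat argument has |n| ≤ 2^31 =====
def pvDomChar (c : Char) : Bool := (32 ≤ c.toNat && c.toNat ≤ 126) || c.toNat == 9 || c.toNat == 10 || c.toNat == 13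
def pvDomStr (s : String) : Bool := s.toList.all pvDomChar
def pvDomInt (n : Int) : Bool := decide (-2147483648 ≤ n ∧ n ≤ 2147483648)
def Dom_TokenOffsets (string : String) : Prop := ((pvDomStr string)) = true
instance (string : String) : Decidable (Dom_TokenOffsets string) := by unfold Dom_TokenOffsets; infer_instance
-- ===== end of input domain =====

-- B replaces A's index loop with two-index lookback by a run-length decomposition of the
-- category list (groupby) walked run by run; same cost, different decomposition (objective: alternative).

-- unicodedata.category for the ASCII domain (printable + tab/newline/CR); used by both ports
-- (exact on Dom_TokenOffsets; characters outside it are never consulted by the claims)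
def pvCat (c : Char) : String :=
  if 'a' ≤ c ∧ c ≤ 'z' then "Ll"
  else if 'A' ≤ c ∧ c ≤ 'Z' then "Lu"
  else if '0' ≤ c ∧ c ≤ '9' then "Nd"
  else if c = ' ' then "Zs"
  else if c = '\t' ∨ c = '\n' ∨ c = '\r' then "Cc"
  else if c = '$' then "Sc"
  else if c = '(' ∨ c = '[' ∨ c = '{' then "Ps"
  else if c = ')' ∨ c = ']' ∨ c = '}' then "Pe"
  else if c = '+' ∨ c = '<' ∨ c = '=' ∨ c = '>' ∨ c = '|' ∨ c = '~' then "Sm"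
  else if c = '-' then "Pd"
  else if c = '^' ∨ c = '`' then "Sk"
  else if c = '_' then "Pc"
  else "Po"

-- ===== PORT A =====
-- category(string[i]); the index is always in range where A evaluates it, so "" is never produced
def pvCatAt (cs : List Char) (i : Int) : String :=
  match PySem.List.pyGet? cs i with
  | some c => pvCat c
  | none => ""

-- the body of A's `for i in range(1, len(string))` loop; state = (yielded offsets, last)
def pvStepA (cs : List Char) (st : List Int × String) (i : Int) : List Int × String :=
  let current := pvCatAt cs i
  let acc :=
    if st.2 ≠ current then
      if st.2 = "Lu" ∧ current = "Ll" ∧ (i = 1 ∨ (1 < i ∧ pvCatAt cs (i - 2) ≠ "Lu")) then st.1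
      else st.1 ++ [i]
    else st.1
  (acc, current)

def TokenOffsets (string : String) : List Int :=
  let cs := string.toList
  if 0 < cs.length then
    ((PySem.List.pyRange 1 cs.length 1).foldl (pvStepA cs) ([0], pvCatAt cs 0)).1
      ++ [(cs.length : Int)]
  else []

-- ===== PORT B =====
-- itertools.groupby of the category list, as (category, run length) pairs
def pvRLE : List String → List (String × Nat)
  | [] => []
  | c :: rest =>
    match pvRLE rest with
    | [] => [(c, 1)]
    | (d, n) :: t => if c = d then (d, n + 1) :: t else (c, 1) :: (d, n) :: t

-- Source B's `for c, n in runs` loop: emit the running offset at each run boundary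
-- unless the previous run is a single 'Lu' directly followed by 'Ll'
def pvWalk : Int → Option (String × Nat) → List (String × Nat) → List Int
  | _, _, [] => []
  | off, prev, (c, n) :: rest =>
    (match prev with
     | none => []
     | some (pc, pn) => if pc = "Lu" ∧ pn = 1 ∧ c = "Ll" then [] else [off])
    ++ pvWalk (off + n) (some (c, n)) rest

def TokenOffsets_alt (string : String) : List Int :=
  let cs := string.toList
  if cs.isEmpty then []
  else 0 :: pvWalk 0 none (pvRLE (cs.map pvCat)) ++ [(cs.length : Int)]

-- ===== PRECONDITION & SPEC =====
def Spec_TokenOffsets (string : String) (out : List Int) : Prop := out = TokenOffsets_alt string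
instance (string : String) (out : List Int) : Decidable (Spec_TokenOffsets string out) := by unfold Spec_TokenOffsets; infer_instance

-- ===== CLAIM (what is proved, stated in full; the proofs are below) =====
def Claim_equal_TokenOffsets : Prop := ∀ (string : String), Dom_TokenOffsets string → Spec_TokenOffsets string (TokenOffsets string)

-- ===== LEMMAS AND PROOFS =====

-- character-level reference form of the border scan: pp = category two back (if any),
-- last = category one back, i = current offset
def specB : Option String → String → Int → List String → List Int
  | _, _, _, [] => []
  | pp, last, i, c :: rest =>
    (if last ≠ c ∧ ¬(last = "Lu" ∧ c = "Ll" ∧ pp ≠ some "Lu") then [i] else [])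
      ++ specB (some last) c (i + 1) rest

def runsFlat (rs : List (String × Nat)) : List String :=
  rs.flatMap fun p => List.replicate p.2 p.1

def runsOK : String → List (String × Nat) → Prop
  | _, [] => True
  | p, (c, n) :: rest => c ≠ p ∧ 1 ≤ n ∧ runsOK c rest

lemma specB_run (m : Nat) (pp : Option String) (c : String) (off : Int) (rest : List String) :
    specB pp c off (List.replicate m c ++ rest)
      = specB (if m = 0 then pp else some c) c (off + m) rest := by
  induction m generalizing pp off with
  | zero => simp
  | succ m ih =>
      simp only [List.replicate_succ, List.cons_append, specB]
      rw [ih]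
      have : off + 1 + (m : Int) = off + ((m + 1 : Nat) : Int) := by push_cast; ring
      rw [this]
      cases m <;> simp

lemma walk_spec (runs : List (String × Nat)) (pc : String) (pn : Nat) (pp : Option String)
    (off : Int) (hok : runsOK pc runs) (h1 : 1 ≤ pn)
    (h2 : 2 ≤ pn → pp = some pc) (h3 : pn = 1 → pp ≠ some pc) :
    pvWalk off (some (pc, pn)) runs = specB pp pc off (runsFlat runs) := by
  induction runs generalizing pc pn pp off with
  | nil => simp [pvWalk, runsFlat, specB]
  | cons r rest ih =>
      obtain ⟨c, n⟩ := r
      obtain ⟨hne, hn, hok'⟩ := hok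
      have hflat : runsFlat ((c, n) :: rest)
          = c :: (List.replicate (n - 1) c ++ runsFlat rest) := by
        simp only [runsFlat, List.flatMap_cons]
        rw [show n = (n - 1) + 1 by omega]
        simp [List.replicate_succ]
      rw [hflat]
      simp only [pvWalk, specB]
      rw [specB_run]
      have hoff : off + 1 + ((n - 1 : Nat) : Int) = off + (n : Int) := by
        push_cast [hn]; omega
      rw [hoff]
      rw [ih c n (if n - 1 = 0 then some pc else some c) (off + n)
        hok' hn
        (by intro h; rw [if_neg (by omega)])
        (by intro h; rw [if_pos (by omega)]; simpa using (Ne.symm hne))]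
      -- heads agree
      congr 1
      by_cases hlu : pc = "Lu" ∧ c = "Ll"
      · have hiff : (pn = 1) ↔ pp ≠ some "Lu" := by
          constructor
          · intro h; rw [← hlu.1]; exact h3 h
          · intro h
            by_contra hne1
            have := h2 (by omega)
            rw [hlu.1] at this
            exact h this
        by_cases h1' : pn = 1
        · rw [if_pos ⟨hlu.1, h1', hlu.2⟩,
            if_neg (fun hcond => hcond.2 ⟨hlu.1, hlu.2, hiff.mp h1'⟩)]
        · rw [if_neg (fun hcond => h1' hcond.2.1),
            if_pos ⟨Ne.symm hne, fun hm => h1' (hiff.mpr hm.2.2)⟩]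
      · rw [if_neg (fun hcond => hlu ⟨hcond.1, hcond.2.2⟩),
          if_pos ⟨Ne.symm hne, fun hm => hlu ⟨hm.1, hm.2.1⟩⟩]

lemma rle_spec (ls : List String) :
    (pvRLE ls = [] ↔ ls = []) ∧ runsFlat (pvRLE ls) = ls ∧
      (∀ c n t, pvRLE ls = (c, n) :: t → 1 ≤ n ∧ runsOK c t ∧ ls.head? = some c) := by
  induction ls with
  | nil => simp [pvRLE, runsFlat]
  | cons a ls ih =>
      obtain ⟨hiff, hflat, hprops⟩ := ih
      cases h : pvRLE ls with
      | nil =>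
          have hls : ls = [] := hiff.mp h
          subst hls
          refine ⟨by simp [pvRLE], by simp [pvRLE, runsFlat], ?_⟩
          intro c n t hEq
          simp [pvRLE] at hEq
          obtain ⟨⟨hc, hn⟩, ht⟩ := hEq
          subst hc; subst ht
          exact ⟨by omega, trivial, rfl⟩
      | cons p t0 =>
          obtain ⟨d, m⟩ := p
          obtain ⟨hm, hokd, hhead⟩ := hprops d m t0 h
          rw [h] at hflat
          by_cases had : a = d
          · subst had
            have hstep : pvRLE (a :: ls) = (a, m + 1) :: t0 := by
              simp [pvRLE, h]
            refine ⟨by simp [hstep], ?_, ?_⟩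
            · rw [hstep]
              simp only [runsFlat, List.flatMap_cons] at hflat ⊢
              rw [List.replicate_succ]
              simp only [List.cons_append]
              rw [show (List.replicate m a ++ t0.flatMap fun p => List.replicate p.2 p.1) = ls from hflat]
            · intro c n t hEq
              rw [hstep] at hEq
              injection hEq with h1 h2
              injection h1 with hc hn
              subst hc; subst h2
              exact ⟨by omega, hokd, rfl⟩
          · have hstep : pvRLE (a :: ls) = (a, 1) :: (d, m) :: t0 := by
              simp [pvRLE, h, had]
            refine ⟨by simp [hstep], ?_, ?_⟩
            · rw [hstep]
              simp only [runsFlat, List.flatMap_cons] at hflat ⊢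
              simp [hflat]
            · intro c n t hEq
              rw [hstep] at hEq
              injection hEq with h1 h2
              injection h1 with hc hn
              subst hc; subst h2
              exact ⟨by omega, ⟨fun hda => had (Eq.symm hda), hm, hokd⟩, rfl⟩

lemma loopA (cs : List Char) (d : Nat) : ∀ (k : Nat) (acc : List Int), 1 ≤ k →
    cs.length = k + d →
    ((PySem.List.pyRange k cs.length 1).foldl (pvStepA cs) (acc, pvCatAt cs ((k : Int) - 1))).1
      = acc ++ specB (if 2 ≤ k then some (pvCatAt cs ((k : Int) - 2)) else none)
          (pvCatAt cs ((k : Int) - 1)) k ((cs.map pvCat).drop k) := by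
  induction d with
  | zero =>
      intro k acc hk hlen
      rw [PySem.List.pyRange_one_eq_nil (by omega : (cs.length : Int) ≤ k)]
      rw [List.drop_eq_nil_of_le (by simp; omega)]
      simp [specB]
  | succ d ih =>
      intro k acc hk hlen
      have hkn : (k : Int) < cs.length := by omega
      rw [PySem.List.pyRange_one_cons hkn]
      rw [List.foldl_cons]
      have hklt : k < cs.length := by omega
      have hstep : pvStepA cs (acc, pvCatAt cs ((k : Int) - 1)) k =
          (acc ++ (if pvCatAt cs ((k : Int) - 1) ≠ pvCatAt cs k ∧
              ¬(pvCatAt cs ((k : Int) - 1) = "Lu" ∧ pvCatAt cs (k : Int) = "Ll" ∧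
                (if 2 ≤ k then some (pvCatAt cs ((k : Int) - 2)) else none) ≠ some "Lu")
            then [(k : Int)] else []), pvCatAt cs k) := by
        simp only [pvStepA]
        congr 1
        by_cases heq : pvCatAt cs ((k : Int) - 1) = pvCatAt cs (k : Int)
        · rw [if_neg (by simpa using heq), if_neg (by tauto)]
          simp
        · rw [if_pos heq]
          by_cases hmerge : pvCatAt cs ((k : Int) - 1) = "Lu" ∧ pvCatAt cs (k : Int) = "Ll" ∧
              ((k : Int) = 1 ∨ (1 < (k : Int) ∧ pvCatAt cs ((k : Int) - 2) ≠ "Lu"))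
          · rw [if_pos hmerge, if_neg]
            · simp
            · rintro ⟨-, hnm⟩
              refine hnm ⟨hmerge.1, hmerge.2.1, ?_⟩
              rcases hmerge.2.2 with h1 | ⟨h2, h3⟩
              · rw [if_neg (by omega : ¬ 2 ≤ k)]; simp
              · rw [if_pos (by omega : 2 ≤ k)]; simp [h3]
          · rw [if_neg hmerge, if_pos]
            refine ⟨heq, fun hc => hmerge ⟨hc.1, hc.2.1, ?_⟩⟩
            by_cases h2k : 2 ≤ k
            · right
              refine ⟨by omega, ?_⟩
              have := hc.2.2
              rw [if_pos h2k] at this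
              simpa using this
            · left; omega
      rw [hstep]
      have hcast : ((k : Int)) + 1 = ((k + 1 : Nat) : Int) := by push_cast; ring
      rw [hcast]
      have h1 : ((k + 1 : Nat) : Int) - 1 = (k : Int) := by push_cast; ring
      have heq := ih (k + 1)
      rw [h1] at heq
      rw [heq _ (by omega) (by omega)]
      have hdrop : (cs.map pvCat).drop k = pvCatAt cs (k : Int) :: (cs.map pvCat).drop (k + 1) := by
        rw [List.drop_eq_getElem_cons (by simpa using hklt)]
        congr 1
        simp only [List.getElem_map]
        simp [pvCatAt, PySem.List.pyGet?_natCast, List.getElem?_eq_getElem hklt]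
      rw [hdrop]
      conv_rhs => rw [specB]
      rw [if_pos (by omega : 2 ≤ k + 1)]
      have h2 : ((k + 1 : Nat) : Int) - 2 = (k : Int) - 1 := by push_cast; ring
      rw [h2]
      simp [List.append_assoc]

-- ===== VERDICT (by name: the statement is the Claim_ definition above) =====
theorem TokenOffsets_spec : Claim_equal_TokenOffsets := by
  intro string _
  unfold Spec_TokenOffsets TokenOffsets TokenOffsets_alt
  cases hcs : string.toList with
  | nil => simp
  | cons c0 cs' =>
      simp only [List.isEmpty_cons, Bool.false_eq_true, if_false, List.length_cons,
        if_pos (by omega : 0 < cs'.length + 1)]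
      suffices hmain : ((PySem.List.pyRange 1 (((cs'.length + 1 : Nat)) : Int) 1).foldl
          (pvStepA (c0 :: cs')) ([0], pvCatAt (c0 :: cs') 0)).1
          = 0 :: pvWalk 0 none (pvRLE ((c0 :: cs').map pvCat)) by
        rw [hmain]
      rw [show (((cs'.length + 1 : Nat)) : Int) = (cs'.length : Int) + 1 by push_cast; ring]
      -- A side to specB
      have hA := loopA (c0 :: cs') cs'.length 1 [0] (le_refl 1) (by simp [Nat.add_comm])
      norm_num at hA
      -- B side: run-length structure of the category list
      obtain ⟨hiff, hflat, hprops⟩ := rle_spec ((c0 :: cs').map pvCat)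
      cases hr : pvRLE ((c0 :: cs').map pvCat) with
      | nil => exact absurd (hiff.mp hr) (by simp)
      | cons p t =>
          obtain ⟨c, n0⟩ := p
          obtain ⟨hn0, hok, hhead⟩ := hprops c n0 t hr
          rw [hr] at hflat
          have hc0 : pvCat c0 = c := by simpa using hhead
          have hcat0 : pvCatAt (c0 :: cs') 0 = c := by
            simp [pvCatAt, hc0]
          have hsplit : runsFlat ((c, n0) :: t) = List.replicate n0 c ++ runsFlat t := by
            simp [runsFlat]
          rw [hsplit, show n0 = (n0 - 1) + 1 by omega, List.replicate_succ,
            List.cons_append] at hflat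
          simp only [List.map_cons] at hflat
          have hdrop1 : List.map pvCat cs' = List.replicate (n0 - 1) c ++ runsFlat t :=
            (List.cons.inj hflat).2.symm
          have hwalk : pvWalk 0 none ((c, n0) :: t)
              = pvWalk (0 + (n0 : Int)) (some (c, n0)) t := by
            simp [pvWalk]
          rw [hA, hcat0, hdrop1, hwalk, specB_run]
          rw [walk_spec t c n0 (if n0 - 1 = 0 then none else some c) (0 + (n0 : Int)) hok hn0
            (fun h => if_neg (by omega)) (fun h => by rw [if_pos (by omega)]; simp)]
          have hoff : (1 : Int) + ((n0 - 1 : Nat) : Int) = 0 + (n0 : Int) := by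
            push_cast [hn0]; omega
          rw [hoff]
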